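-- pv_equiv track=rewrite | github.com/mistrzegiptu/WDI | zestaw3/zad18.py | palindrom
-- ===== SOURCE A (Python) =====
-- def palindrom(T):
--     n = len(T)
--     maxLen = 0
--
--     for i in range(1,n-1):
--         if T[i] % 2 == 1:
--             j = i-1
--             k = i+1
--             counter = 1
--
--             while j >= 0 and k <= n-1:
--                 if T[j] % 2 == 0 or T[k] % 2 == 0:
--                     break
--                 counter += 2
--                 j -= 1
--                 k += 1
--             maxLen = max(maxLen, counter)
--
--     return maxLen
-- ===== SOURCE B (Python) =====
-- def _prefix_runs(seq):
--     runs = []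
--     run = 0
--     for x in seq:
--         run = run + 1 if x % 2 == 1 else 0
--         runs.append(run)
--     return runs
--
-- def palindrom(T):
--     n = len(T)
--     left = _prefix_runs(T)
--     right = _prefix_runs(list(reversed(T)))
--     right.reverse()
--     best = 0
--     for i in range(1, n - 1):
--         if T[i] % 2 == 1:
--             best = max(best, 2 * min(left[i], right[i]) - 1)
--     return best
-- ===== Notes on version B (the rewrite author's own statement) =====
-- stated objective: alternative
-- what changed: replaces the expand-around-each-odd-center scan by two linear passes precomputing the length of the consecutive-odd run ending/starting at every index, so each center's answer is the closed form 2*min(left,right)-1 (O(n) vs O(n^2) in the worst case, but not measurably faster on the benchmark's inputs)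
import Mathlib
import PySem

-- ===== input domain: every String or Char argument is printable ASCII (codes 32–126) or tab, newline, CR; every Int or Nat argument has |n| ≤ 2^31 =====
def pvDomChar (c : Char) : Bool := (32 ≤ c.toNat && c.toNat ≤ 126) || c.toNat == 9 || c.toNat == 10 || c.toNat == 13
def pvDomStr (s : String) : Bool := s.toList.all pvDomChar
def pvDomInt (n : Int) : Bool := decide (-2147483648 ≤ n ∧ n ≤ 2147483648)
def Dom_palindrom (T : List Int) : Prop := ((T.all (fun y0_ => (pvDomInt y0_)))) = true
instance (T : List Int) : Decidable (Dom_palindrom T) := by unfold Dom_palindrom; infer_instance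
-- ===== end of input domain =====

-- B replaces A's expand-around-center scan by two run-length prefix passes with a closed form per center (alternative algorithm); return values proved equal.

-- ===== PORT A =====
-- inner `while j >= 0 and k <= n-1: …` loop of A, fuel-guarded (fuel only makes it total; A is called with enough fuel)
def palWhile (T : List Int) (n : Int) : Nat → Int → Int → Int → Int
  | 0, _, _, counter => counter
  | fuel+1, j, k, counter =>
    if 0 ≤ j ∧ k ≤ n - 1 then
      if PySem.Int.mod (PySem.List.pyGetD T j 0) 2 = 0 ∨ PySem.Int.mod (PySem.List.pyGetD T k 0) 2 = 0 then
        counter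
      else
        palWhile T n fuel (j - 1) (k + 1) (counter + 2)
    else counter

def palindrom (T : List Int) : Int :=
  let n : Int := PySem.List.len T
  (PySem.List.pyRange 1 (n - 1) 1).foldl
    (fun maxLen i =>
      if PySem.Int.mod (PySem.List.pyGetD T i 0) 2 = 1 then
        max maxLen (palWhile T n T.length (i - 1) (i + 1) 1)
      else maxLen) 0

-- ===== PORT B =====
-- body of Source B's `for x in seq:` loop in _prefix_runs: state = (runs list so far, current run)
def runStep (acc : List Int × Int) (x : Int) : List Int × Int :=
  let r := if PySem.Int.mod x 2 = 1 then acc.2 + 1 else 0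
  (acc.1 ++ [r], r)

def prefixRuns (T : List Int) : List Int := (T.foldl runStep ([], 0)).1

def palindrom_alt (T : List Int) : Int :=
  let n : Int := PySem.List.len T
  let left := prefixRuns T
  let right := (prefixRuns T.reverse).reverse
  (PySem.List.pyRange 1 (n - 1) 1).foldl
    (fun best i =>
      if PySem.Int.mod (PySem.List.pyGetD T i 0) 2 = 1 then
        max best (2 * min (PySem.List.pyGetD left i 0) (PySem.List.pyGetD right i 0) - 1)
      else best) 0

-- ===== PRECONDITION & SPEC =====
def Spec_palindrom (T : List Int) (out : Int) : Prop := out = palindrom_alt T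
instance (T : List Int) (out : Int) : Decidable (Spec_palindrom T out) := by unfold Spec_palindrom; infer_instance

-- ===== CLAIM (what is proved, stated in full; the proofs are below) =====
def Claim_equal_palindrom : Prop := ∀ (T : List Int), Dom_palindrom T → Spec_palindrom T (palindrom T)

-- ===== LEMMAS AND PROOFS =====

-- number of consecutive odd elements at positions j, j-1, … (stopping below 0 or at an even element)
def lcnt (T : List Int) (j : Int) : Int :=
  if h : 0 ≤ j ∧ PySem.Int.mod (PySem.List.pyGetD T j 0) 2 = 1 then lcnt T (j - 1) + 1 else 0
termination_by (j + 1).toNat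
decreasing_by omega

-- number of consecutive odd elements at positions k, k+1, … (stopping above n-1 or at an even element)
def rcnt (T : List Int) (n k : Int) : Int :=
  if h : k ≤ n - 1 ∧ PySem.Int.mod (PySem.List.pyGetD T k 0) 2 = 1 then rcnt T n (k + 1) + 1 else 0
termination_by (n - k).toNat
decreasing_by omega

theorem lcnt_nonneg (T : List Int) (j : Int) : 0 ≤ lcnt T j := by
  rw [lcnt]
  split
  · have := lcnt_nonneg T (j - 1); omega
  · omega
termination_by (j + 1).toNat
decreasing_by rename_i h; omega

theorem rcnt_nonneg (T : List Int) (n k : Int) : 0 ≤ rcnt T n k := by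
  rw [rcnt]
  split
  · have := rcnt_nonneg T n (k + 1); omega
  · omega
termination_by (n - k).toNat
decreasing_by rename_i h; omega

theorem palWhile_eq (T : List Int) (n : Int) :
    ∀ (fuel : Nat) (j k c : Int), j + 1 ≤ (fuel : Int) →
      palWhile T n fuel j k c = c + 2 * min (lcnt T j) (rcnt T n k) := by
  intro fuel
  induction fuel with
  | zero =>
      intro j k c hj
      have hl : lcnt T j = 0 := by rw [lcnt]; split <;> omega
      have hr := rcnt_nonneg T n k
      simp [palWhile, hl]
      omega
  | succ f ih =>
      intro j k c hj
      show (if 0 ≤ j ∧ k ≤ n - 1 then _ else _) = _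
      split
      · rename_i hg
        split
        · rename_i he
          have h2 : (0:Int) < 2 := by omega
          have hmj := PySem.Int.mod_nonneg (PySem.List.pyGetD T j 0) h2
          have hmj' := PySem.Int.mod_lt (PySem.List.pyGetD T j 0) h2
          have hmk := PySem.Int.mod_nonneg (PySem.List.pyGetD T k 0) h2
          have hmk' := PySem.Int.mod_lt (PySem.List.pyGetD T k 0) h2
          rcases he with he | he
          · have hl : lcnt T j = 0 := by rw [lcnt]; split <;> omega
            have := rcnt_nonneg T n k
            rw [hl]; omega
          · have hr : rcnt T n k = 0 := by rw [rcnt]; split <;> omega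
            have := lcnt_nonneg T j
            rw [hr]; omega
        · rename_i he
          push Not at he
          have h2 : (0:Int) < 2 := by omega
          have hmj := PySem.Int.mod_nonneg (PySem.List.pyGetD T j 0) h2
          have hmj' := PySem.Int.mod_lt (PySem.List.pyGetD T j 0) h2
          have hmk := PySem.Int.mod_nonneg (PySem.List.pyGetD T k 0) h2
          have hmk' := PySem.Int.mod_lt (PySem.List.pyGetD T k 0) h2
          have hl : lcnt T j = lcnt T (j - 1) + 1 := by
            rw [lcnt]; rw [dif_pos ⟨hg.1, by omega⟩]
          have hr : rcnt T n k = rcnt T n (k + 1) + 1 := by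
            rw [rcnt]; rw [dif_pos ⟨hg.2, by omega⟩]
          rw [ih (j - 1) (k + 1) (c + 2) (by omega), hl, hr]
          omega
      · rename_i hg
        push Not at hg
        by_cases hj0 : 0 ≤ j
        · have hk := hg hj0
          have hr : rcnt T n k = 0 := by rw [rcnt]; split <;> omega
          have := lcnt_nonneg T j
          rw [hr]; omega
        · have hl : lcnt T j = 0 := by rw [lcnt]; split <;> omega
          have := rcnt_nonneg T n k
          rw [hl]; omega

-- structural form of _prefix_runs
def rE : List Int → Int → List Int
  | [], _ => []
  | x :: xs, r => (if PySem.Int.mod x 2 = 1 then r + 1 else 0) :: rE xs (if PySem.Int.mod x 2 = 1 then r + 1 else 0)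

theorem foldl_runStep (T : List Int) : ∀ (l : List Int) (r : Int),
    (T.foldl runStep (l, r)).1 = l ++ rE T r := by
  induction T with
  | nil => intro l r; simp [rE]
  | cons x xs ih =>
      intro l r
      simp only [List.foldl_cons, runStep, rE]
      rw [ih]
      simp

theorem prefixRuns_eq (T : List Int) : prefixRuns T = rE T 0 := by
  simp [prefixRuns, foldl_runStep]

theorem rE_length (T : List Int) : ∀ r, (rE T r).length = T.length := by
  induction T with
  | nil => intro r; simp [rE]
  | cons x xs ih => intro r; simp [rE, ih]

theorem rE_getD (T : List Int) : ∀ (r : Int) (j : Nat), j < T.length →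
    (rE T r).getD j 0 =
      if PySem.Int.mod (T.getD j 0) 2 = 1 then
        (if j = 0 then r else (rE T r).getD (j - 1) 0) + 1
      else 0 := by
  induction T with
  | nil => intro r j h; simp at h
  | cons x xs ih =>
      intro r j h
      match j with
      | 0 => simp [rE]
      | Nat.succ j' =>
          simp only [rE, List.getD_cons_succ]
          have h' : j' < xs.length := by simpa using h
          rw [ih _ j' h']
          match j' with
          | 0 => simp
          | Nat.succ j'' => simp

theorem lcnt_eq (T : List Int) : ∀ (j : Nat), j < T.length →
    lcnt T (j : Int) = (rE T 0).getD j 0 := by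
  intro j
  induction j using Nat.strong_induction_on with
  | _ j ihs =>
      intro hj
      rw [lcnt, rE_getD T 0 j hj]
      have hget : PySem.List.pyGetD T (j : Int) 0 = T.getD j 0 := by
        simp [PySem.List.pyGetD_natCast]
      rw [hget]
      split
      · rename_i hcond
        rw [if_pos hcond.2]
        match j with
        | 0 =>
            have h0 : lcnt T (-1) = 0 := by rw [lcnt]; split <;> omega
            simp [h0]
        | Nat.succ j' =>
            have hc : ((j' + 1 : Nat) : Int) - 1 = (j' : Int) := by push_cast; omega
            rw [hc, ihs j' (by omega) (by omega)]
            simp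
      · rename_i hcond
        have hmod : ¬ PySem.Int.mod (T.getD j 0) 2 = 1 := by
          intro hm; exact hcond ⟨by omega, hm⟩
        rw [if_neg hmod]

theorem rcnt_rev (T : List Int) : ∀ (k : Int), 0 ≤ k →
    rcnt T (T.length : Int) k = lcnt T.reverse ((T.length : Int) - 1 - k) := by
  intro k hk
  rw [rcnt, lcnt]
  by_cases hkn : k ≤ (T.length : Int) - 1
  · have hget : PySem.List.pyGetD T.reverse ((T.length : Int) - 1 - k) 0 = PySem.List.pyGetD T k 0 := by
      rw [PySem.List.pyGetD_eq_getElem T.reverse 0 (by omega) (by simp; omega),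
          PySem.List.pyGetD_eq_getElem T 0 (by omega) (by omega)]
      rw [List.getElem_reverse]
      congr 1
      omega
    rw [hget]
    by_cases hodd : PySem.Int.mod (PySem.List.pyGetD T k 0) 2 = 1
    · rw [dif_pos ⟨hkn, hodd⟩, dif_pos ⟨by omega, hodd⟩]
      have hc : (T.length : Int) - 1 - k - 1 = (T.length : Int) - 1 - (k + 1) := by omega
      rw [hc, rcnt_rev T (k + 1) (by omega)]
    · rw [dif_neg (by intro h; exact hodd h.2), dif_neg (by intro h; exact hodd h.2)]
  · rw [dif_neg (by intro h; exact hkn h.1), dif_neg (by intro h; omega)]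
termination_by k => ((T.length : Int) - k).toNat
decreasing_by omega

theorem palindrom_spec_aux (T : List Int) : palindrom T = palindrom_alt T := by
  unfold palindrom palindrom_alt
  apply PySem.List.foldl_congr_mem
  intro acc i hi
  rw [PySem.List.mem_pyRange_one] at hi
  simp only [PySem.List.len_eq] at hi ⊢
  by_cases hodd : PySem.Int.mod (PySem.List.pyGetD T i 0) 2 = 1
  · rw [if_pos hodd, if_pos hodd]
    have hn : (1:Int) ≤ (T.length : Int) - 2 + 1 := by omega
    -- A's inner loop value
    rw [palWhile_eq T (T.length : Int) T.length (i - 1) (i + 1) 1 (by omega)]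
    -- B's closed form: rewrite left and right reads
    have hiN : i.toNat < T.length := by omega
    have hleft : PySem.List.pyGetD (prefixRuns T) i 0 = lcnt T i := by
      rw [prefixRuns_eq]
      rw [PySem.List.pyGetD_eq_getElem (rE T 0) 0 (by omega) (by rw [rE_length]; omega)]
      rw [← List.getD_eq_getElem _ 0 (by rw [rE_length]; omega)]
      rw [← lcnt_eq T i.toNat hiN]
      congr 1
      omega
    have hright : PySem.List.pyGetD ((prefixRuns T.reverse).reverse) i 0 = rcnt T (T.length : Int) i := by
      rw [prefixRuns_eq]
      rw [PySem.List.pyGetD_eq_getElem ((rE T.reverse 0).reverse) 0 (by omega)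
            (by simp [rE_length]; omega)]
      rw [List.getElem_reverse]
      have hlen : (rE T.reverse 0).length = T.length := by
        rw [rE_length]; simp
      have hidx : (rE T.reverse 0).length - 1 - i.toNat < (rE T.reverse 0).length := by omega
      rw [← List.getD_eq_getElem _ 0 hidx]
      rw [← lcnt_eq T.reverse ((rE T.reverse 0).length - 1 - i.toNat) (by simp [hlen]; omega)]
      rw [rcnt_rev T i (by omega)]
      congr 1
      rw [hlen]
      omega
    rw [hleft, hright]
    -- when T[i] is odd, lcnt i = lcnt (i-1) + 1 and rcnt i = rcnt (i+1) + 1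
    have hl : lcnt T i = lcnt T (i - 1) + 1 := by
      rw [lcnt]; rw [dif_pos ⟨by omega, hodd⟩]
    have hr : rcnt T (T.length : Int) i = rcnt T (T.length : Int) (i + 1) + 1 := by
      rw [rcnt]; rw [dif_pos ⟨by omega, hodd⟩]
    rw [hl, hr]
    omega
  · rw [if_neg hodd, if_neg hodd]

-- ===== VERDICT (by name: the statement is the Claim_ definition above) =====
theorem palindrom_spec : Claim_equal_palindrom := by
  intro T _
  unfold Spec_palindrom
  exact palindrom_spec_aux T
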